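-- pv_equiv track=rewrite | github.com/RamananVr/Leetcodepython | arrays/2219_unknown_title.py | maximumSumScore
-- ===== SOURCE A (Python) =====
-- def maximumSumScore(nums):
--     """
--     Function to calculate the maximum sum score of the array at any index.
--
--     Args:
--     nums (List[int]): The input array.
--
--     Returns:
--     int: The maximum sum score.
--     """
--     n = len(nums)
--     total_sum = sum(nums)
--     prefix_sum = 0
--     max_score = float('-inf')
--
--     for i in range(n):
--         prefix_sum += nums[i]
--         suffix_sum = total_sum - prefix_sum + nums[i]
--         max_score = max(max_score, max(prefix_sum, suffix_sum))
--
--     return max_score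
-- ===== SOURCE B (Python) =====
-- def maximumSumScore(nums):
--     pre = []
--     s = 0
--     for x in nums:
--         s += x
--         pre.append(s)
--     suf = []
--     s = 0
--     for x in reversed(nums):
--         s += x
--         suf.append(s)
--     return max(max(pre), max(suf))
-- ===== Notes on version B (the rewrite author's own statement) =====
-- stated objective: alternative
-- what changed: A does one interleaved pass deriving each suffix score as total - prefix + nums[i]; B builds the prefix-sum table and the suffix-sum table (prefix sums of the reversed list) in two independent accumulation passes and returns the max of the two table maxima.
-- outside the precondition, e.g. on maximumSumScore([]): A returns -inf, B raises ValueError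
import Mathlib
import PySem

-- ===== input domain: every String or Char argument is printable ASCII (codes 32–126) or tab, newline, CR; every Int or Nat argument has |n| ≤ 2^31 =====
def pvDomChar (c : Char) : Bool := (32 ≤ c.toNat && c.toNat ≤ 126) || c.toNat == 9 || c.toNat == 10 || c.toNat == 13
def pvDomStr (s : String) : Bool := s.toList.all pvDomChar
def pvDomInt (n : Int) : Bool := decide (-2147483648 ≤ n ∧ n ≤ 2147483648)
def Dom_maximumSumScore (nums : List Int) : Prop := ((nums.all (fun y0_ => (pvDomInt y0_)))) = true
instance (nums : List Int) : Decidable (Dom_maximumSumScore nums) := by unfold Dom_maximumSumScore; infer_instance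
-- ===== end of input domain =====

-- B builds the prefix-sum and suffix-sum tables in two independent passes instead of A's
-- single interleaved pass (alternative decomposition, same cost).

-- ===== PORT A =====
-- A's loop state: (prefix_sum, max_score); max_score starts at float('-inf'), modelled as none.
def maximumSumScore (nums : List Int) : Int :=
  let n : Int := nums.length
  let total : Int := nums.sum
  let st := (PySem.List.pyRange 0 n 1).foldl
    (fun (st : Int × Option Int) i =>
      let p := st.1 + PySem.List.pyGetD nums i 0
      let s := total - p + PySem.List.pyGetD nums i 0
      (p, some (match st.2 with
                | none => max p s
                | some m => max m (max p s)))) (0, none)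
  st.2.getD 0   -- none only for nums = [], where A returns float('-inf'): excluded by Pre_

-- ===== PORT B =====
def maximumSumScore_alt (nums : List Int) : Int :=
  let pre := (nums.foldl (fun (st : List Int × Int) x => (st.1 ++ [st.2 + x], st.2 + x)) ([], 0)).1
  let suf := (nums.reverse.foldl (fun (st : List Int × Int) x => (st.1 ++ [st.2 + x], st.2 + x)) ([], 0)).1
  -- max(pre) / max(suf): Python max on a nonempty list (empty excluded by Pre_)
  max ((PySem.List.max? pre (fun y => y)).getD 0) ((PySem.List.max? suf (fun y => y)).getD 0)

-- ===== PRECONDITION & SPEC =====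
-- Pre_ excludes the empty list: there A returns float('-inf'), which is not an int, and B raises ValueError.
def Pre_maximumSumScore (nums : List Int) : Prop := nums ≠ []
instance (nums : List Int) : Decidable (Pre_maximumSumScore nums) := by unfold Pre_maximumSumScore; infer_instance
def pvWitness_maximumSumScore : List Int := [1, -2, 3]

def Spec_maximumSumScore (nums : List Int) (out : Int) : Prop := out = maximumSumScore_alt nums
instance (nums : List Int) (out : Int) : Decidable (Spec_maximumSumScore nums out) := by unfold Spec_maximumSumScore; infer_instance

-- ===== CLAIM (what is proved, stated in full; the proofs are below) =====
def Claim_equal_maximumSumScore : Prop := ∀ (nums : List Int), Dom_maximumSumScore nums → Pre_maximumSumScore nums → Spec_maximumSumScore nums (maximumSumScore nums)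

-- ===== LEMMAS AND PROOFS =====

-- prefix sums starting from accumulator p
def pvScans (p : Int) : List Int → List Int
  | [] => []
  | x :: xs => (p + x) :: pvScans (p + x) xs

-- suffix sums
def pvSufs : List Int → List Int
  | [] => []
  | x :: xs => (x + xs.sum) :: pvSufs xs

-- per-index scores of A's loop, with total T and running prefix p
def pvVals (T p : Int) : List Int → List Int
  | [] => []
  | x :: xs => max (p + x) (T - (p + x) + x) :: pvVals T (p + x) xs

def pvMFold (m : Option Int) (vs : List Int) : Option Int :=
  vs.foldl (fun m v => some (match m with | none => v | some a => max a v)) m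

theorem pvScans_length (p : Int) (xs : List Int) : (pvScans p xs).length = xs.length := by
  induction xs generalizing p with
  | nil => rfl
  | cons x xs ih => simp [pvScans, ih]

theorem pvSufs_length (xs : List Int) : (pvSufs xs).length = xs.length := by
  induction xs with
  | nil => rfl
  | cons x xs ih => simp [pvSufs, ih]

theorem pvScans_append (p : Int) (as bs : List Int) :
    pvScans p (as ++ bs) = pvScans p as ++ pvScans (p + as.sum) bs := by
  induction as generalizing p with
  | nil => simp [pvScans]
  | cons a as ih => simp [pvScans, ih, add_assoc]

theorem pvSufs_eq_reverse_scans (xs : List Int) :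
    pvSufs xs = (pvScans 0 xs.reverse).reverse := by
  induction xs with
  | nil => rfl
  | cons x xs ih =>
      simp [pvSufs, ih, List.reverse_cons, pvScans_append, pvScans]
      omega

-- B's list-building fold
theorem pvBuild (xs : List Int) (acc : List Int) (p : Int) :
    (xs.foldl (fun (st : List Int × Int) x => (st.1 ++ [st.2 + x], st.2 + x)) (acc, p)).1
      = acc ++ pvScans p xs := by
  induction xs generalizing acc p with
  | nil => simp [pvScans]
  | cons x xs ih => simp [List.foldl_cons, ih, pvScans]

-- A's fold computes pvMFold over pvVals
theorem pvAFold (T : Int) (xs : List Int) (p : Int) (m : Option Int) :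
    (xs.foldl
      (fun (st : Int × Option Int) x =>
        ((st.1 + x),
         some (match st.2 with | none => max (st.1 + x) (T - (st.1 + x) + x)
                               | some a => max a (max (st.1 + x) (T - (st.1 + x) + x))))) (p, m)).2
      = pvMFold m (pvVals T p xs) := by
  induction xs generalizing p m with
  | nil => rfl
  | cons x xs ih =>
      rw [List.foldl_cons, ih]
      rfl

theorem pvMFold_some (a : Int) (vs : List Int) :
    pvMFold (some a) vs = some (vs.foldl max a) := by
  induction vs generalizing a with
  | nil => rfl
  | cons v vs ih => simp [pvMFold, List.foldl_cons] at ih ⊢; exact ih (max a v)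

theorem pvVals_eq_zipWith (xs : List Int) (T p : Int) (h : T = p + xs.sum) :
    pvVals T p xs = List.zipWith max (pvScans p xs) (pvSufs xs) := by
  induction xs generalizing p with
  | nil => rfl
  | cons x xs ih =>
      have hsum : T = p + (x + xs.sum) := by simpa using h
      simp only [pvVals, pvScans, pvSufs, List.zipWith_cons_cons]
      rw [show T - (p + x) + x = x + xs.sum by omega, ih (p + x) (by omega)]

theorem pvMax_zip (as : List Int) (bs : List Int) (a b : Int) (h : as.length = bs.length) :
    (List.zipWith max as bs).foldl max (max a b) = max (as.foldl max a) (bs.foldl max b) := by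
  induction as generalizing bs a b with
  | nil =>
      have : bs = [] := List.eq_nil_of_length_eq_zero h.symm
      simp [this]
  | cons x as ih =>
      cases bs with
      | nil => simp at h
      | cons y bs =>
          simp only [List.zipWith_cons_cons, List.foldl_cons]
          have hre : max (max a b) (max x y) = max (max a x) (max b y) := by omega
          rw [hre, ih bs (max a x) (max b y) (by simpa using h)]

theorem foldl_max_out (l : List Int) (a x : Int) : l.foldl max (max a x) = max (l.foldl max a) x := by
  induction l generalizing a x with
  | nil => rfl
  | cons y l ih =>
      simp only [List.foldl_cons]
      rw [show max (max a x) y = max (max a y) x by omega, ih]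

theorem foldl_max_reverse (l : List Int) (a : Int) : l.reverse.foldl max a = l.foldl max a := by
  induction l generalizing a with
  | nil => rfl
  | cons x l ih =>
      simp only [List.reverse_cons, List.foldl_append, List.foldl_cons, List.foldl_nil]
      rw [ih, ← foldl_max_out]

theorem nemax_reverse (v : Int) (t : List Int) :
    ((v :: t).reverse).foldl max (((v :: t).reverse).headI) = t.foldl max v := by
  have hne : (v :: t).reverse ≠ [] := by simp
  have hmem : ((v :: t).reverse).headI ∈ v :: t := by
    rw [← List.mem_reverse]
    obtain ⟨a, l, hal⟩ := List.exists_cons_of_ne_nil hne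
    simp [hal]
  have hle : ((v :: t).reverse).headI ≤ t.foldl max v :=
    PySem.List.max?_isMax (PySem.List.max?_id_cons v t) _ hmem
  rw [foldl_max_reverse]
  simp only [List.foldl_cons]
  rw [max_comm, foldl_max_out]
  omega

-- ===== VERDICT (by name: the statement is the Claim_ definition above) =====
theorem maximumSumScore_spec : Claim_equal_maximumSumScore := by
  intro nums _ hpre
  unfold Spec_maximumSumScore maximumSumScore maximumSumScore_alt
  obtain ⟨x, xs, rfl⟩ := List.exists_cons_of_ne_nil hpre
  dsimp only
  rw [PySem.List.foldl_pyRange_zero_pyGetD' (x :: xs) 0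
      (fun (st : Int × Option Int) v =>
        ((st.1 + v),
         some (match st.2 with | none => max (st.1 + v) ((x :: xs).sum - (st.1 + v) + v)
                               | some a => max a (max (st.1 + v) ((x :: xs).sum - (st.1 + v) + v))))) (0, none)]
  rw [pvAFold, pvBuild, pvBuild]
  simp only [List.nil_append]
  rw [pvVals_eq_zipWith _ _ 0 (by simp)]
  rw [show pvScans 0 (x :: xs) = (0 + x) :: pvScans (0 + x) xs from rfl]
  rw [show pvSufs (x :: xs) = (x + xs.sum) :: pvSufs xs from rfl]
  rw [List.zipWith_cons_cons]
  rw [show pvMFold none (max (0 + x) (x + xs.sum) :: List.zipWith max (pvScans (0 + x) xs) (pvSufs xs))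
        = pvMFold (some (max (0 + x) (x + xs.sum))) (List.zipWith max (pvScans (0 + x) xs) (pvSufs xs)) from rfl]
  rw [pvMFold_some, Option.getD_some]
  rw [pvMax_zip _ _ _ _ (by rw [pvScans_length, pvSufs_length])]
  rw [PySem.List.max?_id_cons]
  simp only [Option.getD_some]
  congr 1
  have hrev : (x :: xs).reverse ≠ [] := by simp
  obtain ⟨y, ys, hys⟩ := List.exists_cons_of_ne_nil hrev
  have hA : (pvSufs xs).foldl max (x + xs.sum)
      = (pvSufs (x :: xs)).foldl max ((pvSufs (x :: xs)).headI) := by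
    simp [pvSufs, List.foldl_cons, max_self]
  rw [hA, pvSufs_eq_reverse_scans, hys]
  rw [show pvScans 0 (y :: ys) = (0 + y) :: pvScans (0 + y) ys from rfl]
  rw [nemax_reverse, PySem.List.max?_id_cons, Option.getD_some]
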